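-- pv_equiv track=rewrite | github.com/ameliajochna/advanced-python | lista8/zad2.py | doable
-- ===== SOURCE A (Python) =====
-- def make_dictionary(word):
--     ans = dict()
--     for c in word:
--         key = c
--         if key in ans.keys():
--             ans.update({key: ans[key] + 1})
--         else:
--             ans.update({key: 1})
--     return ans
--
-- def doable(base, word):
--     b_count = make_dictionary(base)
--
--     for c in word:
--         key = c
--         if key in b_count.keys() and b_count[key] > 0:
--             b_count.update({key: b_count[key] - 1})
--         else:
--             return False
--     return True
-- ===== SOURCE B (Python) =====
-- def doable(base, word):
--     base_count = {}
--     for c in base: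
--         base_count[c] = base_count.get(c, 0) + 1
--     word_count = {}
--     for c in word:
--         word_count[c] = word_count.get(c, 0) + 1
--     return all(base_count.get(c, 0) >= need for c, need in word_count.items())
-- ===== Notes on version B (the rewrite author's own statement) =====
-- stated objective: simpler
-- what changed: B tabulates full frequency counts of both base and word once and returns a single subset comparison (every needed count available), replacing A's per-character decrement loop with early returns.
import Mathlib
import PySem

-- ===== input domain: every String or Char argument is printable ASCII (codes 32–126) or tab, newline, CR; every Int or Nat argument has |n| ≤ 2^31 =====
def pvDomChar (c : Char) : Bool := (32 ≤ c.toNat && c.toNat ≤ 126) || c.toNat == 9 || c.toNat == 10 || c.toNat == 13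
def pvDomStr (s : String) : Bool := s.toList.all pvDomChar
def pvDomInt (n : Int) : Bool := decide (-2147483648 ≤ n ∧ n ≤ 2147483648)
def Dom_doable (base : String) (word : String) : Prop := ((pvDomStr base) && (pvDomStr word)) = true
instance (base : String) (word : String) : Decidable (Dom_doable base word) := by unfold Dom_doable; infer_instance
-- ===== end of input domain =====

-- B counts both strings up front and does one subset comparison instead of A's decrement loop; objective: simpler.

-- ===== PORT A =====
def makeDictionary (word : String) : PySem.Dict Char Int :=
  word.toList.foldl
    (fun ans c =>
      if ans.contains c then ans.insert c (ans.getD c 0 + 1) else ans.insert c 1)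
    PySem.Dict.empty

def doableLoop : List Char → PySem.Dict Char Int → Bool
  | [], _ => true
  | c :: rest, d =>
      if d.contains c && decide (0 < d.getD c 0) then
        doableLoop rest (d.insert c (d.getD c 0 - 1))
      else false

def doable (base : String) (word : String) : Bool :=
  doableLoop word.toList (makeDictionary base)

-- ===== PORT B =====
def doable_alt (base : String) (word : String) : Bool :=
  let baseCount := base.toList.foldl (fun d c => d.insert c (d.getD c 0 + 1))
    (PySem.Dict.empty : PySem.Dict Char Int)
  let wordCount := word.toList.foldl (fun d c => d.insert c (d.getD c 0 + 1))
    (PySem.Dict.empty : PySem.Dict Char Int)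
  wordCount.items.all (fun p => baseCount.getD p.1 0 ≥ p.2)

-- ===== PRECONDITION & SPEC =====
def Spec_doable (base : String) (word : String) (out : Bool) : Prop := out = doable_alt base word
instance (base : String) (word : String) (out : Bool) : Decidable (Spec_doable base word out) := by unfold Spec_doable; infer_instance

-- ===== CLAIM (what is proved, stated in full; the proofs are below) =====
def Claim_equal_doable : Prop := ∀ (base : String) (word : String), Dom_doable base word → Spec_doable base word (doable base word)

-- ===== LEMMAS AND PROOFS =====

theorem makeDictionary_eq_counter (word : String) :
    makeDictionary word = PySem.Dict.counter word.toList := by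
  rw [← PySem.Dict.foldl_insert_getD_add_one_eq_counter]
  unfold makeDictionary
  congr 1
  funext d c
  by_cases h : d.contains c = true
  · simp [h]
  · simp only [Bool.not_eq_true] at h
    simp [h, PySem.Dict.getD_of_not_contains _ _ h]

theorem doableLoop_iff (ws : List Char) (d : PySem.Dict Char Int)
    (hnn : ∀ c, 0 ≤ d.getD c 0) :
    doableLoop ws d = true ↔ ∀ c, (ws.count c : Int) ≤ d.getD c 0 := by
  induction ws generalizing d with
  | nil =>
      constructor
      · intro _ c; simpa using hnn c
      · intro _; rfl
  | cons c rest ih =>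
      by_cases hpos : 0 < d.getD c 0
      · have hcont : d.contains c = true := by
          by_contra hc
          simp only [Bool.not_eq_true] at hc
          rw [PySem.Dict.getD_of_not_contains _ _ hc] at hpos
          omega
        have hnn' : ∀ x, 0 ≤ (d.insert c (d.getD c 0 - 1)).getD x 0 := by
          intro x
          rw [PySem.Dict.getD_insert]
          split_ifs with hx
          · omega
          · exact hnn x
        rw [show doableLoop (c :: rest) d = doableLoop rest (d.insert c (d.getD c 0 - 1)) by
              simp [doableLoop, hcont, hpos],
            ih _ hnn']
        apply forall_congr'
        intro x
        rw [PySem.Dict.getD_insert, List.count_cons]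
        by_cases hxc : x = c
        · subst hxc
          simp only [beq_self_eq_true, if_true]
          push_cast
          omega
        · have hbne : (c == x) = false := by
            simp [beq_eq_false_iff_ne, Ne.symm hxc]
          simp [hxc, hbne]
      · have hz : d.getD c 0 = 0 := le_antisymm (by omega) (hnn c)
        have hfalse : doableLoop (c :: rest) d = false := by
          simp [doableLoop, hz]
        rw [hfalse]
        simp only [Bool.false_eq_true, false_iff, not_forall]
        refine ⟨c, ?_⟩
        rw [hz]
        simp

theorem doable_alt_iff (base word : String) :
    doable_alt base word = true ↔
      ∀ c, ((word.toList.count c : Int) ≤ (base.toList.count c : Int)) := by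
  simp only [doable_alt, PySem.Dict.foldl_insert_getD_add_one_eq_counter]
  simp only [PySem.Dict.items_counter, List.all_eq_true, List.forall_mem_map,
    PySem.Dict.getD_counter, ge_iff_le, decide_eq_true_eq]
  constructor
  · intro h c
    by_cases hc : c ∈ word.toList
    · exact h c ((PySem.Set.mem_ofList _ _).mpr hc)
    · rw [List.count_eq_zero_of_not_mem hc]
      positivity
  · intro h c _
    exact h c

-- ===== VERDICT (by name: the statement is the Claim_ definition above) =====
theorem doable_spec : Claim_equal_doable := by
  intro base word _
  unfold Spec_doable doable
  rw [Bool.eq_iff_iff, makeDictionary_eq_counter,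
      doableLoop_iff _ _ (fun c => by rw [PySem.Dict.getD_counter]; positivity),
      doable_alt_iff]
  simp [PySem.Dict.getD_counter]
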